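-- pv_equiv track=rewrite | github.com/EdvardPedersen/CS-Team-Bot | team_roll.py | sum_weighted_preferences
-- ===== SOURCE A (Python) =====
-- def sum_weighted_preferences(preferences):
--     sum = {}
--     for maps in preferences.values():
--         for map,score in maps.items():
--             try:
--                 sum[map] += score
--             except KeyError:
--                 sum[map] = score
--
--     return sum
-- ===== SOURCE B (Python) =====
-- def sum_weighted_preferences(preferences):
--     # Phase 1: ordered universe of map names (first-occurrence order).
--     order = {}
--     for voter in preferences.values():
--         for m in voter:
--             order[m] = None
--     # Phase 2: per-map total across all voters.
--     return {m: sum(voter.get(m, 0) for voter in preferences.values()) for m in order}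
-- ===== Notes on version B (the rewrite author's own statement) =====
-- stated objective: alternative
-- what changed: Replaces A's single accumulating try/except pass into a running totals dict with a two-phase scheme: first collect the ordered universe of map names, then compute each map's total by a per-key scan over all voters' dicts with .get(m, 0).
import Mathlib
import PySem

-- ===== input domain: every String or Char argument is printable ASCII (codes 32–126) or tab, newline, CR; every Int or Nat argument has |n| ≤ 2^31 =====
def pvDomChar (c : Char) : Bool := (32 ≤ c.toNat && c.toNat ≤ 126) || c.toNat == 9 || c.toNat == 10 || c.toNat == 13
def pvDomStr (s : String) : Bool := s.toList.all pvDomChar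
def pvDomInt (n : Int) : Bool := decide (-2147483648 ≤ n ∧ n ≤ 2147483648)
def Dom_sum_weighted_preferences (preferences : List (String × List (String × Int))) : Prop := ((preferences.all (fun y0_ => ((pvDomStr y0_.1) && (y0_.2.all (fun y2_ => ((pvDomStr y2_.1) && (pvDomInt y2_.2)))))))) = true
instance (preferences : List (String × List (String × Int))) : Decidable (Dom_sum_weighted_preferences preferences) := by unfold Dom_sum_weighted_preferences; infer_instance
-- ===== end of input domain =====

-- B replaces A's single accumulating try/except pass with a two-phase scheme (ordered key
-- universe first, then a per-key scan over all voters); objective: alternative decomposition.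


-- ===== PORT A =====
def sum_weighted_preferences (preferences : List (String × List (String × Int))) : List (String × Int) :=
  (preferences.foldl (fun s maps =>
      maps.2.foldl (fun s p =>
        match s.get? p.1 with
        | some v => s.insert p.1 (v + p.2)
        | none   => s.insert p.1 p.2) s)
    PySem.Dict.empty).items

-- ===== PORT B =====
def sum_weighted_preferences_alt (preferences : List (String × List (String × Int))) : List (String × Int) :=
  (preferences.foldl (fun d voter => voter.2.foldl (fun d p => d.insert p.1 ()) d)
      (PySem.Dict.empty : PySem.Dict String Unit)).keys.map (fun m =>
    (m, (preferences.map (fun voter => (PySem.Dict.mk voter.2).getD m 0)).sum))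

-- ===== PRECONDITION & SPEC =====
-- Pre_ excludes association lists in which some voter's inner dict carries a duplicate map
-- name: such lists do not represent any Python dict (Python dicts have unique keys), and on
-- them the two ports' treatments of the duplicates (accumulate vs first match) both defensibly differ.
def Pre_sum_weighted_preferences (preferences : List (String × List (String × Int))) : Prop :=
  ∀ e ∈ preferences, (e.2.map Prod.fst).Nodup
instance (preferences : List (String × List (String × Int))) : Decidable (Pre_sum_weighted_preferences preferences) := by unfold Pre_sum_weighted_preferences; infer_instance

def pvWitness_sum_weighted_preferences : (List (String × List (String × Int))) :=
  [("alice", [("dust", 3), ("mirage", 1)]), ("bob", [("dust", 2)])]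

def Spec_sum_weighted_preferences (preferences : List (String × List (String × Int))) (out : List (String × Int)) : Prop := out = sum_weighted_preferences_alt preferences
instance (preferences : List (String × List (String × Int))) (out : List (String × Int)) : Decidable (Spec_sum_weighted_preferences preferences out) := by unfold Spec_sum_weighted_preferences; infer_instance

-- ===== CLAIM (what is proved, stated in full; the proofs are below) =====
def Claim_equal_sum_weighted_preferences : Prop := ∀ (preferences : List (String × List (String × Int))), Dom_sum_weighted_preferences preferences → Pre_sum_weighted_preferences preferences → Spec_sum_weighted_preferences preferences (sum_weighted_preferences preferences)

-- ===== LEMMAS AND PROOFS =====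

-- total of the scores attached to key m in a flat list of (map, score) pairs
def pvSKey (m : String) (l : List (String × Int)) : Int :=
  ((l.filter (fun p => p.1 = m)).map Prod.snd).sum

theorem pvSKey_nil (m : String) : pvSKey m [] = 0 := rfl

theorem pvSKey_cons (m : String) (p : String × Int) (t : List (String × Int)) :
    pvSKey m (p :: t) = (if p.1 = m then p.2 else 0) + pvSKey m t := by
  simp only [pvSKey, List.filter_cons]
  split_ifs with h <;> simp_all

theorem pvSKey_append (m : String) (l₁ l₂ : List (String × Int)) :
    pvSKey m (l₁ ++ l₂) = pvSKey m l₁ + pvSKey m l₂ := by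
  simp [pvSKey, List.filter_append]

theorem pvSKey_eq_zero (m : String) (l : List (String × Int)) (h : m ∉ l.map Prod.fst) :
    pvSKey m l = 0 := by
  induction l with
  | nil => rfl
  | cons p t ih =>
    simp only [List.map_cons, List.mem_cons, not_or] at h
    rw [pvSKey_cons, if_neg (fun hp => h.1 hp.symm), ih h.2, add_zero]

-- A's try/except body is "insert the old total (default 0) plus the score"
theorem pvStepA_eq :
    (fun (s : PySem.Dict String Int) (p : String × Int) =>
      match s.get? p.1 with
      | some v => s.insert p.1 (v + p.2)
      | none   => s.insert p.1 p.2)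
    = fun s p => s.insert p.1 (s.getD p.1 0 + p.2) := by
  funext s p
  cases h : s.get? p.1 with
  | none => simp [PySem.Dict.getD_eq_get?_getD, h]
  | some v => simp [PySem.Dict.getD_eq_get?_getD, h]

-- running-total invariant of A's accumulating fold
theorem pvGetD_fold (l : List (String × Int)) (d : PySem.Dict String Int) (m : String) :
    (l.foldl (fun s p => s.insert p.1 (s.getD p.1 0 + p.2)) d).getD m 0
      = d.getD m 0 + pvSKey m l := by
  induction l generalizing d with
  | nil => simp [pvSKey_nil]
  | cons p t ih =>
    rw [List.foldl_cons, ih, pvSKey_cons, PySem.Dict.getD_insert]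
    by_cases hp : p.1 = m
    · rw [if_pos hp.symm, if_pos hp, hp]; ring
    · rw [if_neg (fun h => hp h.symm), if_neg hp]; ring

-- on a duplicate-free inner dict, .get(m, 0) is the total of m's entries
theorem pvGetD_mk (voter : List (String × Int)) (h : (voter.map Prod.fst).Nodup) (m : String) :
    (PySem.Dict.mk voter).getD m 0 = pvSKey m voter := by
  induction voter with
  | nil => rfl
  | cons p t ih =>
    obtain ⟨k, v⟩ := p
    simp only [List.map_cons, List.nodup_cons] at h
    rw [PySem.Dict.getD_eq_get?_getD, PySem.Dict.get?_mk_cons, pvSKey_cons]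
    by_cases hp : k = m
    · have hz : pvSKey m t = 0 := pvSKey_eq_zero m t (hp ▸ h.1)
      simp [hp, hz]
    · have hb : ¬ ((k == m) = true) := by simpa using hp
      rw [if_neg hb, ← PySem.Dict.getD_eq_get?_getD, ih h.2]
      simp [hp]

-- summing each voter's contribution equals the total over the flattened pair list
theorem pvSum_flat (prefs : List (String × List (String × Int))) (m : String) :
    (prefs.map (fun voter => pvSKey m voter.2)).sum = pvSKey m (prefs.flatMap (·.2)) := by
  induction prefs with
  | nil => rfl
  | cons p t ih => simp [pvSKey_append, ih]

-- ===== VERDICT (by name: the statement is the Claim_ definition above) =====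
theorem sum_weighted_preferences_spec : Claim_equal_sum_weighted_preferences := by
  intro prefs _hdom hpre
  unfold Spec_sum_weighted_preferences sum_weighted_preferences sum_weighted_preferences_alt
  rw [pvStepA_eq,
    ← List.foldl_flatMap (f := fun (e : String × List (String × Int)) => e.2),
    ← List.foldl_flatMap (f := fun (e : String × List (String × Int)) => e.2)]
  set flat := prefs.flatMap (·.2) with hflat
  have hnodA : (flat.foldl (fun s p => s.insert p.1 (s.getD p.1 0 + p.2))
      (PySem.Dict.empty : PySem.Dict String Int)).keys.Nodup :=
    PySem.Dict.nodup_keys_foldl_insert_key flat Prod.fst _ _ (by simp [PySem.Dict.keys_empty])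
  rw [PySem.Dict.items_eq_map_keys _ hnodA 0]
  have hkeys : (flat.foldl (fun s p => s.insert p.1 (s.getD p.1 0 + p.2))
        (PySem.Dict.empty : PySem.Dict String Int)).keys
      = (flat.foldl (fun d p => d.insert p.1 ())
        (PySem.Dict.empty : PySem.Dict String Unit)).keys := by
    rw [PySem.Dict.keys_foldl_insert_key flat Prod.fst,
      PySem.Dict.keys_foldl_insert_key flat Prod.fst]
    
    rfl
  rw [hkeys]
  apply List.map_congr_left
  intro m _
  have hval : ∀ voter ∈ prefs, (PySem.Dict.mk voter.2).getD m 0 = pvSKey m voter.2 :=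
    fun voter hv => pvGetD_mk voter.2 (hpre voter hv) m
  rw [pvGetD_fold, PySem.Dict.getD_empty, zero_add,
    List.map_congr_left hval, pvSum_flat]
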